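-- pv_equiv track=rewrite | github.com/asycd/candlestick-pattern-recognition | script.py | longest_positive_or_negative
-- ===== SOURCE A (Python) =====
-- def longest_positive_or_negative(candles):
--     maxPositive = 1
--     actualPositive = 1
--     maxNegative = 1
--     actualNegative = 1
--
--     for i in range(1,len(candles)):
--         if candles[i] == candles[i-1] and candles[i] == 1:
--             actualPositive += 1
--         else:
--             actualPositive = 1
--
--         if candles[i] == candles[i-1] and candles[i] == -1:
--             actualNegative += 1
--         else:
--             actualNegative = 1
--
--         if actualPositive > maxPositive:
--             maxPositive = actualPositive
--         if actualNegative > maxNegative: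
--             maxNegative = actualNegative
--
--     return maxPositive,maxNegative
-- ===== SOURCE B (Python) =====
-- def longest_positive_or_negative(candles):
--     # Build maximal runs (value, length) first, then scan the runs.
--     runs = []
--     for x in candles:
--         if runs and runs[-1][0] == x:
--             runs[-1][1] += 1
--         else:
--             runs.append([x, 1])
--     maxPositive = 1
--     maxNegative = 1
--     for key, n in runs:
--         if key == 1 and n > maxPositive:
--             maxPositive = n
--         if key == -1 and n > maxNegative:
--             maxNegative = n
--     return maxPositive, maxNegative
-- ===== Notes on version B (the rewrite author's own statement) =====
-- stated objective: alternative
-- what changed: B first compresses the list into maximal (value, length) runs and then scans the runs for the longest 1-run and (-1)-run, instead of A's single element-wise pass with two reset counters and two running maxima.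
import Mathlib
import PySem

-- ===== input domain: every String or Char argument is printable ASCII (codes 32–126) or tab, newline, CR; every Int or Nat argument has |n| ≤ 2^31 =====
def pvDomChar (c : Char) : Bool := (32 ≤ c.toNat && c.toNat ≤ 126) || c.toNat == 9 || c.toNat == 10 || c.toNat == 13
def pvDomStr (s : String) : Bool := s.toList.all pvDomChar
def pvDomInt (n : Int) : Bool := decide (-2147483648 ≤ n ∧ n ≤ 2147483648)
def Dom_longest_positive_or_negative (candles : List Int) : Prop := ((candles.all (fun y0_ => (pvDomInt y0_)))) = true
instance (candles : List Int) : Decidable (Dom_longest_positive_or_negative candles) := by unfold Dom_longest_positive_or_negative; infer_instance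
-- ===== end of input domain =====

-- B builds the maximal runs of equal values first and then scans the runs, replacing
-- A's element-by-element dual reset-counter pass; alternative decomposition, same O(n) cost.


-- ===== PORT A =====
-- loop body of A's 'for i in range(1, len(candles))' (state = (maxPositive, actualPositive, maxNegative, actualNegative))
def pvStepA (candles : List Int) (st : Int × Int × Int × Int) (i : Int) : Int × Int × Int × Int :=
  let ap' := if PySem.List.pyGetD candles i 0 = PySem.List.pyGetD candles (i-1) 0 ∧
                PySem.List.pyGetD candles i 0 = 1 then st.2.1 + 1 else 1
  let an' := if PySem.List.pyGetD candles i 0 = PySem.List.pyGetD candles (i-1) 0 ∧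
                PySem.List.pyGetD candles i 0 = -1 then st.2.2.2 + 1 else 1
  let mp' := if ap' > st.1 then ap' else st.1
  let mn' := if an' > st.2.2.1 then an' else st.2.2.1
  (mp', ap', mn', an')

def longest_positive_or_negative (candles : List Int) : Int × Int :=
  let s := (PySem.List.pyRange 1 (candles.length : Int) 1).foldl (pvStepA candles) (1, 1, 1, 1)
  (s.1, s.2.2.1)

-- ===== PORT B =====
-- 'if runs and runs[-1][0] == x: runs[-1][1] += 1 else: runs.append([x, 1])'
def pvRunStep (runs : List (Int × Int)) (x : Int) : List (Int × Int) :=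
  match runs.getLast? with
  | some (v, c) => if v = x then runs.dropLast ++ [(v, c + 1)] else runs ++ [(x, 1)]
  | none => [(x, 1)]

-- body of B's loop over the runs
def pvScanStep (m : Int × Int) (r : Int × Int) : Int × Int :=
  (if r.1 = 1 ∧ r.2 > m.1 then r.2 else m.1,
   if r.1 = -1 ∧ r.2 > m.2 then r.2 else m.2)

def longest_positive_or_negative_alt (candles : List Int) : Int × Int :=
  (candles.foldl pvRunStep []).foldl pvScanStep (1, 1)

-- ===== PRECONDITION & SPEC =====
def Spec_longest_positive_or_negative (candles : List Int) (out : Int × Int) : Prop := out = longest_positive_or_negative_alt candles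
instance (candles : List Int) (out : Int × Int) : Decidable (Spec_longest_positive_or_negative candles out) := by unfold Spec_longest_positive_or_negative; infer_instance

-- ===== CLAIM (what is proved, stated in full; the proofs are below) =====
def Claim_equal_longest_positive_or_negative : Prop := ∀ (candles : List Int), Dom_longest_positive_or_negative candles → Spec_longest_positive_or_negative candles (longest_positive_or_negative candles)

-- ===== LEMMAS AND PROOFS =====

def pvAfold (xs : List Int) : Int × Int × Int × Int :=
  (PySem.List.pyRange 1 (xs.length : Int) 1).foldl (pvStepA xs) (1, 1, 1, 1)

def pvRunsOf (xs : List Int) : List (Int × Int) := xs.foldl pvRunStep []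

def pvScanOf (rs : List (Int × Int)) : Int × Int := rs.foldl pvScanStep (1, 1)

-- the invariant relating A's loop state after xs to B's runs of xs
def pvInv (xs : List Int) : Prop :=
  ∃ rs v c, pvRunsOf xs = rs ++ [(v, c)] ∧ xs.getLast? = some v ∧ 1 ≤ c ∧
    pvAfold xs = ((pvScanStep (pvScanOf rs) (v, c)).1,
                  (if v = 1 then c else 1),
                  (pvScanStep (pvScanOf rs) (v, c)).2,
                  (if v = -1 then c else 1)) ∧
    1 ≤ (pvScanOf rs).1 ∧ 1 ≤ (pvScanOf rs).2

lemma pvScanOf_concat (rs : List (Int × Int)) (r : Int × Int) :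
    pvScanOf (rs ++ [r]) = pvScanStep (pvScanOf rs) r := by
  unfold pvScanOf
  rw [List.foldl_append, List.foldl_cons, List.foldl_nil]

lemma pvRunsOf_concat (xs : List Int) (x : Int) :
    pvRunsOf (xs ++ [x]) = pvRunStep (pvRunsOf xs) x := by
  unfold pvRunsOf
  rw [List.foldl_append, List.foldl_cons, List.foldl_nil]

lemma pvGetD_append_left (xs ys : List Int) (i : Int) (h0 : 0 ≤ i) (h1 : i < (xs.length : Int)) :
    PySem.List.pyGetD (xs ++ ys) i 0 = PySem.List.pyGetD xs i 0 := by
  rw [PySem.List.pyGetD_eq_getElem _ 0 h0 (by simp; omega),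
      PySem.List.pyGetD_eq_getElem _ 0 h0 h1]
  exact List.getElem_append_left (by omega)

lemma pvAfold_append (xs : List Int) (x : Int) (h : xs ≠ []) :
    pvAfold (xs ++ [x]) = pvStepA (xs ++ [x]) (pvAfold xs) (xs.length : Int) := by
  have hn : (1:Int) ≤ (xs.length : Int) := by
    have := List.length_pos_iff.mpr h; omega
  have hlen : (((xs ++ [x]).length : Int)) = (xs.length : Int) + 1 := by
    push_cast [List.length_append, List.length_singleton]; ring
  unfold pvAfold
  rw [hlen, PySem.List.pyRange_one_succ_right hn, List.foldl_append, List.foldl_cons, List.foldl_nil]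
  congr 1
  apply PySem.List.foldl_congr_mem
  intro acc i hi
  rw [PySem.List.mem_pyRange_one] at hi
  unfold pvStepA
  rw [pvGetD_append_left xs [x] i (by omega) (by omega),
      pvGetD_append_left xs [x] (i-1) (by omega) (by omega)]

lemma pvInv_step (xs : List Int) (x : Int) (h : xs ≠ []) (hI : pvInv xs) : pvInv (xs ++ [x]) := by
  obtain ⟨rs, v, c, hruns, hlast, hc, hA, hM1, hM2⟩ := hI
  have hn : (1:Int) ≤ (xs.length : Int) := by
    have := List.length_pos_iff.mpr h; omega
  -- the two indexings done by A's last iteration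
  have hcur : PySem.List.pyGetD (xs ++ [x]) (xs.length : Int) 0 = x := by
    rw [PySem.List.pyGetD_eq_getElem _ 0 (by omega) (by simp)]
    exact List.getElem_concat_length (by omega) _
  have hprev : PySem.List.pyGetD (xs ++ [x]) ((xs.length : Int) - 1) 0 = v := by
    rw [pvGetD_append_left xs [x] _ (by omega) (by omega),
        PySem.List.pyGetD_eq_getElem _ 0 (by omega) (by omega)]
    have h2 : ((xs.length : Int) - 1).toNat = xs.length - 1 := by omega
    have h3 : xs[((xs.length : Int) - 1).toNat]? = some v := by
      rw [h2, ← List.getLast?_eq_getElem?]; exact hlast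
    rw [List.getElem?_eq_getElem (by omega)] at h3
    exact Option.some.inj h3
  have hrunsx : pvRunsOf (xs ++ [x]) = pvRunStep (rs ++ [(v, c)]) x := by
    rw [pvRunsOf_concat, hruns]
  have hAx : pvAfold (xs ++ [x]) = pvStepA (xs ++ [x]) (pvAfold xs) (xs.length : Int) :=
    pvAfold_append xs x h
  by_cases hvx : v = x
  · -- the new element extends the last run
    refine ⟨rs, v, c + 1, ?_, by rw [List.getLast?_concat, hvx], by omega, ?_, hM1, hM2⟩
    · rw [hrunsx]
      unfold pvRunStep
      rw [List.getLast?_concat]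
      simp [hvx]
    · rw [hAx, hA]
      simp only [pvStepA, hcur, hprev]
      generalize pvScanOf rs = M at hM1 hM2 ⊢
      obtain ⟨M1, M2⟩ := M
      subst hvx
      have h1 : 1 ≤ M1 := hM1
      have h2 : 1 ≤ M2 := hM2
      simp only [pvScanStep, Prod.mk.injEq, true_and]
      refine ⟨?_, ?_, ?_, ?_⟩ <;> split_ifs <;> omega
  · -- the new element starts a fresh run
    refine ⟨rs ++ [(v, c)], x, 1, ?_, List.getLast?_concat, le_refl 1, ?_, ?_, ?_⟩
    · rw [hrunsx]
      unfold pvRunStep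
      rw [List.getLast?_concat]
      simp [hvx]
    · rw [hAx, hA, pvScanOf_concat]
      simp only [pvStepA, hcur, hprev]
      generalize pvScanOf rs = M at hM1 hM2 ⊢
      obtain ⟨M1, M2⟩ := M
      have h1 : 1 ≤ M1 := hM1
      have h2 : 1 ≤ M2 := hM2
      have hxv : ¬ (x = v) := fun e => hvx e.symm
      simp only [pvScanStep, Prod.mk.injEq]
      refine ⟨?_, ?_, ?_, ?_⟩ <;> split_ifs <;> omega
    · rw [pvScanOf_concat]
      generalize pvScanOf rs = M at hM1 hM2 ⊢
      obtain ⟨M1, M2⟩ := M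
      have h1 : 1 ≤ M1 := hM1
      have h2 : 1 ≤ M2 := hM2
      simp only [pvScanStep]
      split_ifs <;> omega
    · rw [pvScanOf_concat]
      generalize pvScanOf rs = M at hM1 hM2 ⊢
      obtain ⟨M1, M2⟩ := M
      have h1 : 1 ≤ M1 := hM1
      have h2 : 1 ≤ M2 := hM2
      simp only [pvScanStep]
      split_ifs <;> omega

lemma pvInv_all (xs : List Int) (h : xs ≠ []) : pvInv xs := by
  induction xs using List.reverseRecOn with
  | nil => exact absurd rfl h
  | append_singleton ys y ih =>
    rcases List.eq_nil_or_concat' ys with rfl | ⟨zs, z, rfl⟩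
    · refine ⟨[], y, 1, rfl, rfl, le_refl 1, ?_, le_refl 1, le_refl 1⟩
      have h0 : ((([] : List Int) ++ [y]).length : Int) = 1 := by simp
      unfold pvAfold
      rw [h0, PySem.List.pyRange_one_eq_nil le_rfl, List.foldl_nil]
      simp [pvScanOf, pvScanStep]
    · exact pvInv_step _ y (by simp) (ih (by simp))

-- ===== VERDICT (by name: the statement is the Claim_ definition above) =====
theorem longest_positive_or_negative_spec : Claim_equal_longest_positive_or_negative := by
  intro candles _
  unfold Spec_longest_positive_or_negative
  rcases List.eq_nil_or_concat' candles with rfl | ⟨zs, z, rfl⟩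
  · rfl
  · obtain ⟨rs, v, c, hruns, _, _, hA, _, _⟩ := pvInv_all (zs ++ [z]) (by simp)
    have hL : longest_positive_or_negative (zs ++ [z])
        = ((pvAfold (zs ++ [z])).1, (pvAfold (zs ++ [z])).2.2.1) := rfl
    have hR : longest_positive_or_negative_alt (zs ++ [z]) = pvScanOf (pvRunsOf (zs ++ [z])) := rfl
    rw [hL, hR, hA, hruns, pvScanOf_concat]
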